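-- pv_equiv track=rewrite | github.com/icochico/python-challenges | 10_least_common.py | solution
-- ===== SOURCE A (Python) =====
-- from collections import Counter
--
-- def solution(numbers):
--
--     if len(numbers) == 0:
--         return []
--
--     c = Counter(numbers)
--     # get least common
--     least_common = c.most_common()[:-2:-1]
--     # get value if non empty
--     min = least_common[0][1]
--     result = []
--     for key in c.keys():
--        if c[key] == min:
--            result.append(key)
--
--     result.sort()
--
--     return result
-- ===== SOURCE B (Python) =====
-- from collections import Counter
--
--
-- def solution(numbers):
--     if not numbers:
--         return []
--     buckets = {}
--     for key, cnt in Counter(numbers).items():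
--         buckets.setdefault(cnt, []).append(key)
--     return sorted(buckets[min(buckets)])
-- ===== Notes on version B (the rewrite author's own statement) =====
-- stated objective: simpler
-- what changed: B groups keys into a count-indexed bucket dict and reads off sorted(buckets[min(buckets)]) instead of sorting the whole Counter by count and re-scanning all keys against the minimal count.
import Mathlib
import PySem

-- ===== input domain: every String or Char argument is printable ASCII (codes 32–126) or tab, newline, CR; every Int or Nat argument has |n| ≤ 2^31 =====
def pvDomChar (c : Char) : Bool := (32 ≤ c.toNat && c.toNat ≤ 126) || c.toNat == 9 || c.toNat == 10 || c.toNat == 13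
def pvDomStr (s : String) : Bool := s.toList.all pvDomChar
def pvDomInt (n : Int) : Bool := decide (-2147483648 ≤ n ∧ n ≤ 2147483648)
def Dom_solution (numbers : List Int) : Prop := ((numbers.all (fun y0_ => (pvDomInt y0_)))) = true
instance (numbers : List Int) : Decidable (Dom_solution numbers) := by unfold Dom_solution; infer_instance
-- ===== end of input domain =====

-- B groups keys into a count-indexed bucket dict and returns sorted(buckets[min(buckets)])
-- instead of sorting the whole Counter by count and re-scanning all keys against the minimal count.

-- ===== PORT A =====
def solution (numbers : List Int) : List Int :=
  if numbers.length = 0 then [] else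
    let c := PySem.Dict.counter numbers
    -- c.most_common() = sorted(c.items(), key=itemgetter(1), reverse=True)
    let mostCommon := PySem.List.sorted c.items (fun p => p.2) true
    -- most_common()[:-2:-1]
    let leastCommon := (PySem.List.slice? mostCommon none (some (-2)) (-1)).getD []
    -- least_common[0][1]; the `none` branch is Python's IndexError, unreachable since numbers ≠ []
    match PySem.List.pyGet? leastCommon 0 with
    | none => []
    | some kv =>
      let mn := kv.2
      -- c[key] for key ∈ c.keys() never raises KeyError, so getD 0 is exact here
      let result := c.keys.foldl
        (fun acc key => if c.getD key 0 = mn then acc ++ [key] else acc) ([] : List Int)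
      PySem.List.sorted result (fun x => x) false

-- ===== PORT B =====
def solution_alt (numbers : List Int) : List Int :=
  if numbers = [] then [] else
    let c := PySem.Dict.counter numbers
    -- buckets.setdefault(cnt, []).append(key) mutates the bucket list in place = modify cnt [] (· ++ [key])
    let buckets := c.items.foldl
      (fun (b : PySem.Dict Int (List Int)) kv => b.modify kv.2 [] (fun l => l ++ [kv.1]))
      PySem.Dict.empty
    -- min(buckets); the `none` branch is Python's ValueError on an empty sequence, unreachable
    match PySem.List.min? buckets.keys (fun x => x) with
    | none => []
    | some m => PySem.List.sorted (buckets.getD m []) (fun x => x) false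

-- ===== PRECONDITION & SPEC =====
def Spec_solution (numbers : List Int) (out : List Int) : Prop := out = solution_alt numbers
instance (numbers : List Int) (out : List Int) : Decidable (Spec_solution numbers out) := by unfold Spec_solution; infer_instance

-- ===== CLAIM (what is proved, stated in full; the proofs are below) =====
def Claim_equal_solution : Prop := ∀ (numbers : List Int), Dom_solution numbers → Spec_solution numbers (solution numbers)

-- ===== LEMMAS AND PROOFS =====

-- xs[:-2:-1] is the one-element list holding xs's last element (nonempty xs)
lemma slice_last {α : Type} (xs : List α) (h : xs ≠ []) :
    PySem.List.slice? xs none (some (-2)) (-1) = some [xs.getLast h] := by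
  obtain ⟨n, hn⟩ : ∃ n, xs.length = n + 1 := ⟨xs.length - 1, by cases xs <;> simp_all⟩
  simp only [PySem.List.slice?, PySem.List.sliceIndices, hn]
  norm_num
  rw [if_pos (by omega : (↑n + 1 : Int) < 2 + ↑n)]
  rw [(by omega : ((n:Int) - (-2 + (n+1))).toNat = 1)]
  simp only [List.range_one, List.filterMap_cons, List.filterMap_nil]
  norm_num
  rw [List.getElem?_eq_getElem (by omega : n < xs.length)]
  rw [List.getLast_eq_getElem]
  simp [hn]

-- the last element of a reverse-sorted-by-key list has minimal key
lemma getLast_key_min {α : Type} (xs : List (α × Int)) (h : PySem.List.sorted xs (fun p => p.2) true ≠ []) :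
    ∀ p ∈ xs, ((PySem.List.sorted xs (fun p => p.2) true).getLast h).2 ≤ p.2 := by
  intro p hp
  set mc := PySem.List.sorted xs (fun p => p.2) true with hmc
  have hpw : mc.reverse.Pairwise (fun a b => a.2 ≤ b.2) := by
    rw [List.pairwise_reverse]
    exact PySem.List.sorted_pairwise_rev xs (fun p => p.2)
  have hpm : p ∈ mc.reverse := by
    rw [List.mem_reverse, hmc, PySem.List.mem_sorted]; exact hp
  have hlast : mc.getLast h = mc.reverse.head (by simpa using h) := by
    rw [List.head_reverse]
  rw [hlast]
  obtain ⟨a, t, he⟩ := List.exists_cons_of_ne_nil (l := mc.reverse) (by simpa using h)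
  have hha : mc.reverse.head (by simpa using h) = a := by simp [he]
  rw [hha]
  rw [he] at hpw hpm
  rcases List.mem_cons.mp hpm with rfl | hpt
  · exact le_refl _
  · exact (List.pairwise_cons.mp hpw).1 p hpt

-- the two programs agree on every input
lemma solution_eq_alt (numbers : List Int) : solution numbers = solution_alt numbers := by
  by_cases hne : numbers = []
  · subst hne; rfl
  · unfold solution solution_alt
    rw [if_neg (by simpa using hne), if_neg hne]
    simp only [PySem.Dict.items_counter, PySem.Dict.keys_counter]
    set S := PySem.Set.ofList numbers with hS
    set items := S.map (fun k => (k, (numbers.count k : Int))) with hitems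
    have hSne : S ≠ [] := by
      intro hc
      obtain ⟨x, hx⟩ := List.exists_mem_of_ne_nil numbers hne
      have : x ∈ S := (PySem.Set.mem_ofList _ _).mpr hx
      simp [hc] at this
    have hitemsne : items ≠ [] := by simp [hitems, hSne]
    set mc := PySem.List.sorted items (fun p => p.2) true with hmc
    have hmcne : mc ≠ [] := by
      rw [hmc, Ne, PySem.List.sorted_eq_nil_iff]; exact hitemsne
    rw [slice_last mc hmcne]
    set last := mc.getLast hmcne with hlast
    have hget : PySem.List.pyGet? [last] (0 : Int) = some last := rfl
    rw [Option.getD_some, hget]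
    -- B side: keys of the bucket dict are exactly the distinct counts
    rw [PySem.Dict.keys_foldl_modify_key items (fun kv => kv.2) [] (fun _ kv => fun l => l ++ [kv.1])]
    rw [PySem.Dict.keys_empty, PySem.Set.update_nil_left]
    set counts := items.map (fun kv => kv.2) with hcounts
    have hcne : counts ≠ [] := by simp [hcounts, hitemsne]
    have hKne : PySem.Set.ofList counts ≠ [] := by
      intro hc
      obtain ⟨y, hy⟩ := List.exists_mem_of_ne_nil counts hcne
      have := (PySem.Set.mem_ofList counts y).mpr hy
      simp [hc] at this
    obtain ⟨m, hm⟩ : ∃ m, PySem.List.min? (PySem.Set.ofList counts) (fun x => x) = some m := by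
      cases hq : PySem.List.min? (PySem.Set.ofList counts) (fun x => x) with
      | none => exact absurd ((PySem.List.min?_eq_none_iff _ _).mp hq) hKne
      | some m => exact ⟨m, rfl⟩
    rw [hm]
    simp only
    -- A's minimal count (snd of last of most_common) equals B's minimal count (min of bucket keys)
    have hmin_items : ∀ p ∈ items, last.2 ≤ p.2 := getLast_key_min items hmcne
    have hm_counts : m ∈ counts := (PySem.Set.mem_ofList _ _).mp (PySem.List.min?_mem hm)
    have hlast_items : last ∈ items := by
      have hmem : last ∈ mc := List.getLast_mem hmcne
      exact (PySem.List.mem_sorted items (fun p => p.2) true last).mp hmem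
    have hlast_counts : last.2 ∈ counts := by
      rw [hcounts]; exact List.mem_map_of_mem hlast_items
    have h1 : last.2 ≤ m := by
      obtain ⟨p, hp, hpe⟩ := List.mem_map.mp hm_counts
      rw [← hpe]; exact hmin_items p hp
    have h2 : m ≤ last.2 := PySem.List.min?_isMin hm _ ((PySem.Set.mem_ofList _ _).mpr hlast_counts)
    have hm_eq : m = last.2 := le_antisymm h2 h1
    subst hm_eq
    -- A's result list is the keys with minimal count, in first-occurrence order
    have hA : List.foldl (fun acc key => if (PySem.Dict.counter numbers).getD key 0 = last.2 then acc ++ [key] else acc) ([] : List Int) S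
        = S.filter (fun k => (numbers.count k : Int) == last.2) := by
      have hfun : (fun (acc : List Int) key => if (PySem.Dict.counter numbers).getD key 0 = last.2 then acc ++ [key] else acc)
          = (fun acc key => if (fun k => (numbers.count k : Int) == last.2) key = true then acc ++ [id key] else acc) := by
        funext acc key
        simp [PySem.Dict.getD_counter]
      rw [hfun, PySem.List.foldl_append_if]
      simp
    -- B's minimal bucket is the same list of keys
    have hB : (List.foldl (fun b kv => b.modify kv.2 [] fun l => l ++ [kv.1]) PySem.Dict.empty items).getD last.2 []
        = S.filter (fun k => (numbers.count k : Int) == last.2) := by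
      have hswap : List.foldl (fun (b : PySem.Dict Int (List Int)) kv => b.modify kv.2 [] fun l => l ++ [kv.1]) PySem.Dict.empty items
          = List.foldl (fun d p => d.modify p.1 [] fun x => x ++ [p.2]) PySem.Dict.empty (items.map Prod.swap) := by
        simp only [List.foldl_map]
        rfl
      rw [hswap, PySem.Dict.getD_foldl_modify_append, PySem.Dict.getD_empty]
      rw [List.nil_append, hitems, List.map_map, List.filter_map, List.map_map]
      simp [Function.comp_def]
    rw [hA, hB]

-- ===== VERDICT (by name: the statement is the Claim_ definition above) =====
theorem solution_spec : Claim_equal_solution := by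
  intro numbers _
  unfold Spec_solution
  exact solution_eq_alt numbers
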